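-- pv_equiv track=rewrite | github.com/atik-05/Aspect_Based_Sentiment_Analysis_Bangla | Unigram_based_classification.py | add_word_count
-- ===== SOURCE A (Python) =====
-- def add_word_count(list_of_dictionary):
--     length = len(list_of_dictionary)
--     all_word = list_of_dictionary[0]
--     for i in  range(1, length):
--         for key1, value1 in all_word.items():
--             found = 0
--             for key2, value2 in list_of_dictionary[i].items():
--                 if key1 == key2:
--                     all_word[key1] = value1 + value2
--                     found = 1
--                     break
--             if found == 0:
--                 all_word[key1] = value1
--     return all_word
-- ===== SOURCE B (Python) =====
-- def add_word_count(list_of_dictionary):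
--     # B: one indexing pass builds a global totals dict, then the totals are
--     # written back onto the first dict's keys (mutates dict 0 in place, like A).
--     totals = {}
--     for d in list_of_dictionary:
--         for k, v in d.items():
--             totals[k] = totals.get(k, 0) + v
--     all_word = list_of_dictionary[0]
--     for key in list(all_word):
--         all_word[key] = totals[key]
--     return all_word
-- ===== Notes on version B (the rewrite author's own statement) =====
-- stated objective: faster
-- what changed: Replaces A's per-key linear search through every later dict (one scan per key of dict 0 per dict) by a single pass that indexes all dicts into one totals dict, followed by a write-back of the totals onto the first dict's keys.
-- outside the precondition, e.g. on add_word_count([]): A raises IndexError, B raises IndexError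
import Mathlib
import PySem

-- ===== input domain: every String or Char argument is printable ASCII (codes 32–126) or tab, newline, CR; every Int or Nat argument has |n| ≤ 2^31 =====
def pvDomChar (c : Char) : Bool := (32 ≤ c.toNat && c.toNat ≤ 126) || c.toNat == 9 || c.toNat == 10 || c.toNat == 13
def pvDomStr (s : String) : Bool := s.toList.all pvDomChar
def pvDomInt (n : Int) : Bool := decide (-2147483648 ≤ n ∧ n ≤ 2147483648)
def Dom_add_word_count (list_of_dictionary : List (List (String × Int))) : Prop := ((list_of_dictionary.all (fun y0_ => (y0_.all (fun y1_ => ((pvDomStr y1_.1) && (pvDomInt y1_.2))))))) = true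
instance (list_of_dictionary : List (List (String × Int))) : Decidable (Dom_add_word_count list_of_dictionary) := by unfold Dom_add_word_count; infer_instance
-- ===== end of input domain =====

-- B replaces A's per-key linear search through every later dict by one global
-- totals pass plus a write-back onto the first dict's keys (measured faster by
-- a timing run; both A and B mutate the first dict in place in Python —
-- the equivalence proved here is about the RETURN value).

-- ===== PORT A =====
-- the inner 'for key2, value2 in …: if key1 == key2: … break' with the found flag:
-- returns the matching value2 (first match) or none (found == 0)
def pyFindA (key1 : String) : List (String × Int) → Option Int
  | [] => none
  | (key2, value2) :: rest => if key1 == key2 then some value2 else pyFindA key1 rest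

-- one iteration of 'for key1, value1 in all_word.items(): …' (keys never change
-- during the pass and each key is written only at its own step, so iterating the
-- snapshot of items is exact)
def passA (all_word : PySem.Dict String Int) (d : PySem.Dict String Int) : PySem.Dict String Int :=
  all_word.items.foldl (fun acc kv =>
    match pyFindA kv.1 d.items with
    | some value2 => acc.insert kv.1 (kv.2 + value2)
    | none => acc.insert kv.1 kv.2) all_word

def add_word_count (list_of_dictionary : List (List (String × Int))) : List (String × Int) :=
  match list_of_dictionary with
  | [] => []   -- list_of_dictionary[0] raises IndexError: excluded by Pre_
  | d0 :: rest =>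
    ((rest.map PySem.Dict.ofList).foldl passA (PySem.Dict.ofList d0)).items

-- ===== PORT B =====
-- totals over ALL dicts: totals[k] = totals.get(k, 0) + v
def totalsB (list_of_dictionary : List (List (String × Int))) : PySem.Dict String Int :=
  list_of_dictionary.foldl (fun t d =>
    (PySem.Dict.ofList d).items.foldl (fun t kv => t.insert kv.1 (t.getD kv.1 0 + kv.2)) t)
    PySem.Dict.empty

def add_word_count_alt (list_of_dictionary : List (List (String × Int))) : List (String × Int) :=
  let totals := totalsB list_of_dictionary
  match list_of_dictionary with
  | [] => []   -- list_of_dictionary[0] raises IndexError: excluded by Pre_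
  | d0 :: _ =>
    let all_word := PySem.Dict.ofList d0
    -- for key in list(all_word): all_word[key] = totals[key]
    -- (every key of all_word is a key of totals, so totals[key] never raises;
    --  getD … 0 is exact here)
    (all_word.keys.foldl (fun aw k => aw.insert k (totals.getD k 0)) all_word).items

-- ===== PRECONDITION & SPEC =====
-- Pre_ excludes only the empty list, on which A (and B) raise IndexError at list_of_dictionary[0]
def Pre_add_word_count (list_of_dictionary : List (List (String × Int))) : Prop :=
  list_of_dictionary ≠ []
instance (list_of_dictionary : List (List (String × Int))) : Decidable (Pre_add_word_count list_of_dictionary) := by unfold Pre_add_word_count; infer_instance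
def pvWitness_add_word_count : (List (List (String × Int))) := [[("a", 1), ("b", 2)], [("b", 3)]]
def Spec_add_word_count (list_of_dictionary : List (List (String × Int))) (out : List (String × Int)) : Prop := out = add_word_count_alt list_of_dictionary
instance (list_of_dictionary : List (List (String × Int))) (out : List (String × Int)) : Decidable (Spec_add_word_count list_of_dictionary out) := by unfold Spec_add_word_count; infer_instance

-- ===== CLAIM (what is proved, stated in full; the proofs are below) =====
def Claim_equal_add_word_count : Prop := ∀ (list_of_dictionary : List (List (String × Int))), Dom_add_word_count list_of_dictionary → Pre_add_word_count list_of_dictionary → Spec_add_word_count list_of_dictionary (add_word_count list_of_dictionary)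

-- ===== LEMMAS AND PROOFS =====

-- a Set updated with itself is itself
theorem pv_update_self (s : List String) : PySem.Set.update s s = s := by
  rw [PySem.Set.update_eq_append_filter]
  have h : (PySem.Set.ofList s).filter (fun y => !(PySem.Set.contains s y)) = [] := by
    apply List.filter_eq_nil_iff.mpr
    intro y hy
    have hmem : y ∈ s := (PySem.Set.mem_ofList _ _).mp hy
    simpa using hmem
  rw [h, List.append_nil]

-- pyFindA is first-match lookup, i.e. Dict.get?
theorem pv_pyFindA_eq_get? (k : String) (items : List (String × Int)) :
    pyFindA k items = (PySem.Dict.mk items).get? k := by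
  induction items with
  | nil => rfl
  | cons hd tl ih =>
    obtain ⟨k2, v2⟩ := hd
    rw [PySem.Dict.get?_mk_cons]
    by_cases h : k = k2
    · subst h; simp [pyFindA]
    · have h2 : ¬ k2 = k := fun hh => h hh.symm
      simp [pyFindA, h, h2, ih]

-- get? = some v pins down find? on items
theorem pv_find?_items (k : String) (v : Int) : ∀ (items : List (String × Int)),
    (PySem.Dict.mk items).get? k = some v →
    items.find? (fun kv => kv.1 == k) = some (k, v) := by
  intro items
  induction items with
  | nil => intro h; exact absurd h (by simp [show (PySem.Dict.mk ([] : List (String × Int))).get? k = none from rfl])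
  | cons hd tl ih =>
    intro h
    obtain ⟨k2, v2⟩ := hd
    rw [PySem.Dict.get?_mk_cons] at h
    by_cases hk : k2 = k
    · subst hk
      simp only [BEq.rfl, if_pos] at h
      rw [List.find?_cons_of_pos (by simp)]
      simp at h
      simp [h]
    · rw [if_neg (by simp [hk])] at h
      rw [List.find?_cons_of_neg (by simp [hk])]
      exact ih h

-- generic: a fold of inserts whose written value depends only on the element
theorem pv_foldl_insert_getD {α : Type} (key : α → String) (g : α → Int) :
    ∀ (l : List α) (acc : PySem.Dict String Int) (k : String),
    (l.map key).Nodup →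
    (l.foldl (fun acc x => acc.insert (key x) (g x)) acc).getD k 0 =
      match l.find? (fun x => key x == k) with
      | some x => g x
      | none => acc.getD k 0 := by
  intro l
  induction l with
  | nil => intro acc k _; simp
  | cons x l ih =>
    intro acc k hnd
    simp only [List.map_cons, List.nodup_cons] at hnd
    obtain ⟨hx, hnd⟩ := hnd
    by_cases h : key x = k
    · rw [List.foldl_cons, List.find?_cons_of_pos (by simp [h]), ih _ k hnd]
      have hnone : l.find? (fun y => key y == k) = none := by
        apply List.find?_eq_none.mpr
        intro y hy
        simp only [beq_iff_eq]
        intro hyk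
        exact hx (List.mem_map.mpr ⟨y, hy, by rw [hyk, h]⟩)
      rw [hnone, ← h]
      exact PySem.Dict.getD_insert_self acc (key x) (g x) 0
    · rw [List.foldl_cons, List.find?_cons_of_neg (by simp [h]), ih _ k hnd]
      cases hf : l.find? (fun y => key y == k) with
      | some y => rfl
      | none => rw [PySem.Dict.getD_insert, if_neg (fun hh => h hh.symm)]

-- passA written as such a fold
theorem pv_passA_eq (aw d : PySem.Dict String Int) :
    passA aw d = aw.items.foldl
      (fun acc kv => acc.insert kv.1 (kv.2 + (d.get? kv.1).getD 0)) aw := by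
  unfold passA
  congr 1
  funext acc kv
  rw [pv_pyFindA_eq_get? kv.1 d.items]
  cases hf : d.get? kv.1 with
  | some v2 => rfl
  | none => simp

theorem pv_passA_keys (aw d : PySem.Dict String Int) : (passA aw d).keys = aw.keys := by
  rw [pv_passA_eq]
  rw [PySem.Dict.keys_foldl_insert_key (key := Prod.fst)
        (f := fun _ kv => kv.2 + (d.get? kv.1).getD 0)]
  have h : aw.items.map Prod.fst = aw.keys := rfl
  rw [h, pv_update_self]

theorem pv_passA_getD (aw d : PySem.Dict String Int) (k : String)
    (hnd : aw.keys.Nodup) (hk : k ∈ aw.keys) :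
    (passA aw d).getD k 0 = aw.getD k 0 + d.getD k 0 := by
  rw [pv_passA_eq]
  have hnd' : (aw.items.map Prod.fst).Nodup := hnd
  obtain ⟨v, hv⟩ : ∃ v, aw.get? k = some v := by
    cases hv : aw.get? k with
    | none => exact absurd ((PySem.Dict.get?_eq_none_iff_not_mem_keys aw k).mp hv) (not_not.mpr hk)
    | some v => exact ⟨v, rfl⟩
  have hfind := pv_find?_items k v aw.items hv
  rw [pv_foldl_insert_getD Prod.fst (fun kv => kv.2 + (d.get? kv.1).getD 0) aw.items aw k hnd']
  rw [hfind]
  simp [PySem.Dict.getD_eq_get?_getD, hv]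

theorem pv_foldA_keys (ds : List (PySem.Dict String Int)) :
    ∀ (aw : PySem.Dict String Int), (ds.foldl passA aw).keys = aw.keys := by
  induction ds with
  | nil => intro aw; rfl
  | cons d ds ih => intro aw; rw [List.foldl_cons, ih, pv_passA_keys]

theorem pv_foldA_getD (ds : List (PySem.Dict String Int)) :
    ∀ (aw : PySem.Dict String Int) (k : String), aw.keys.Nodup → k ∈ aw.keys →
    (ds.foldl passA aw).getD k 0 = aw.getD k 0 + (ds.map (fun d => d.getD k 0)).sum := by
  induction ds with
  | nil => intro aw k _ _; simp
  | cons d ds ih =>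
    intro aw k hnd hk
    rw [List.foldl_cons,
        ih (passA aw d) k (by rw [pv_passA_keys]; exact hnd) (by rw [pv_passA_keys]; exact hk),
        pv_passA_getD aw d k hnd hk]
    simp [add_assoc]

-- B side: the inner accumulation over one dict's items
theorem pv_totals_inner (k : String) : ∀ (items : List (String × Int)) (t : PySem.Dict String Int),
    (items.foldl (fun t kv => t.insert kv.1 (t.getD kv.1 0 + kv.2)) t).getD k 0 =
      t.getD k 0 + ((items.filter (fun kv => kv.1 == k)).map (·.2)).sum := by
  intro items
  induction items with
  | nil => intro t; simp
  | cons kv tl ih =>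
    intro t
    rw [List.foldl_cons, ih, PySem.Dict.getD_insert, List.filter_cons]
    by_cases h : kv.1 = k
    · simp only [h, beq_self_eq_true, if_pos, List.map_cons, List.sum_cons]
      ring
    · have h' : ¬ k = kv.1 := fun hh => h hh.symm
      simp [h, h']

theorem pv_filter_sum (k : String) (d : PySem.Dict String Int) (hnd : d.keys.Nodup) :
    ((d.items.filter (fun kv => kv.1 == k)).map (·.2)).sum = d.getD k 0 := by
  obtain ⟨items⟩ := d
  rw [PySem.Dict.getD_eq_get?_getD]
  simp only [PySem.Dict.keys_mk] at hnd
  induction items with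
  | nil => simp [show (PySem.Dict.mk ([] : List (String × Int))).get? k = none from rfl]
  | cons kv tl ih =>
    simp only [List.map_cons, List.nodup_cons] at hnd
    obtain ⟨hx, hnd⟩ := hnd
    rw [List.filter_cons, PySem.Dict.get?_mk_cons]
    by_cases h : kv.1 = k
    · have htl : tl.filter (fun kv => kv.1 == k) = [] := by
        apply List.filter_eq_nil_iff.mpr
        intro y hy
        simp only [beq_iff_eq]
        intro hyk
        exact hx (List.mem_map.mpr ⟨y, hy, by rw [hyk, ← h]⟩)
      simp [h, htl]
    · have h' : ¬ kv.1 == k := by simp [h]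
      simp only [h', if_neg, Bool.false_eq_true, not_false_iff]
      exact ih hnd

theorem pv_totals_getD (k : String) : ∀ (l : List (List (String × Int))) (t : PySem.Dict String Int),
    (l.foldl (fun t d =>
      (PySem.Dict.ofList d).items.foldl (fun t kv => t.insert kv.1 (t.getD kv.1 0 + kv.2)) t) t).getD k 0
    = t.getD k 0 + (l.map (fun d => (PySem.Dict.ofList d).getD k 0)).sum := by
  intro l
  induction l with
  | nil => intro t; simp
  | cons d l ih =>
    intro t
    rw [List.foldl_cons, ih, pv_totals_inner]
    have hnd : (PySem.Dict.ofList d).keys.Nodup := PySem.Dict.nodup_keys_ofList d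
    rw [pv_filter_sum k (PySem.Dict.ofList d) hnd]
    simp [add_assoc]

theorem pv_find?_self : ∀ (l : List String) (k : String), k ∈ l → l.find? (fun x => x == k) = some k := by
  intro l k hk
  induction l with
  | nil => cases hk
  | cons x l ih =>
    by_cases h : x = k
    · subst h; rw [List.find?_cons_of_pos (by simp)]
    · rw [List.find?_cons_of_neg (by simp [h])]
      rcases List.mem_cons.mp hk with h1 | h1
      · exact absurd h1.symm h
      · exact ih h1

-- B side: the write-back fold
theorem pv_wb_keys (aw : PySem.Dict String Int) (g : String → Int) :
    (aw.keys.foldl (fun aw k => aw.insert k (g k)) aw).keys = aw.keys := by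
  rw [PySem.Dict.keys_foldl_insert (f := fun _ x => g x), pv_update_self]

theorem pv_wb_getD (aw : PySem.Dict String Int) (g : String → Int) (k : String)
    (hnd : aw.keys.Nodup) (hk : k ∈ aw.keys) :
    (aw.keys.foldl (fun aw k => aw.insert k (g k)) aw).getD k 0 = g k := by
  have h := pv_foldl_insert_getD (fun x => x) g aw.keys aw k (by simpa using hnd)
  simp only [] at h
  rw [h, pv_find?_self aw.keys k hk]

-- ===== VERDICT (by name: the statement is the Claim_ definition above) =====
theorem add_word_count_spec : Claim_equal_add_word_count := by
  intro l _hdom hpre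
  unfold Spec_add_word_count
  cases l with
  | nil => exact absurd rfl hpre
  | cons d0 rest =>
    show ((rest.map PySem.Dict.ofList).foldl passA (PySem.Dict.ofList d0)).items
       = ((PySem.Dict.ofList d0).keys.foldl
            (fun aw k => aw.insert k ((totalsB (d0 :: rest)).getD k 0))
            (PySem.Dict.ofList d0)).items
    have hnd : (PySem.Dict.ofList d0).keys.Nodup := PySem.Dict.nodup_keys_ofList d0
    have hka := pv_foldA_keys (rest.map PySem.Dict.ofList) (PySem.Dict.ofList d0)
    have hkb := pv_wb_keys (PySem.Dict.ofList d0) (fun k => (totalsB (d0 :: rest)).getD k 0)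
    rw [PySem.Dict.items_eq_map_keys _ (by rw [hka]; exact hnd) 0,
        PySem.Dict.items_eq_map_keys _ (by rw [hkb]; exact hnd) 0, hka, hkb]
    apply List.map_congr_left
    intro k hk
    rw [pv_foldA_getD (rest.map PySem.Dict.ofList) (PySem.Dict.ofList d0) k hnd hk,
        pv_wb_getD (PySem.Dict.ofList d0) _ k hnd hk]
    simp only [Prod.mk.injEq, true_and]
    rw [show totalsB (d0 :: rest)
          = (d0 :: rest).foldl (fun t d =>
              (PySem.Dict.ofList d).items.foldl
                (fun t kv => t.insert kv.1 (t.getD kv.1 0 + kv.2)) t) PySem.Dict.empty from rfl,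
        pv_totals_getD k (d0 :: rest) PySem.Dict.empty]
    simp [List.map_map, Function.comp_def, PySem.Dict.getD_empty]
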